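-- pv_equiv track=rewrite | github.com/ArielZelaya/sprint2inspirarte | apps/usuario/views.py | addDiasLaborales
-- ===== SOURCE A (Python) =====
-- def addDiasLaborales(dias, horaEntrada, horaSalida):
-- 	cadenaDias = ""
-- 	k=0
-- 	for i in range(len(dias)):
-- 		for j in range(len(horaEntrada)):
-- 			if i == j and dias[i] is not None and horaEntrada[j] != "":
-- 				dias[i] = dias[i] + "(" + str(horaEntrada[j])
--
-- 	for i in range(len(dias)):
-- 		for j in range(len(horaSalida)):
-- 			if i == j and dias[i] is not None and horaSalida[j] != "":
-- 				dias[i] = dias[i] + "-" + str(horaSalida[j])  + ")"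
-- 	for i in range(len(dias)):
-- 		if dias[i] is not None:
-- 			if k == 0:
-- 				cadenaDias = cadenaDias + str(dias[i])
-- 				k = 1
-- 			else:
-- 				cadenaDias = cadenaDias + ", " + str(dias[i])
-- 	return cadenaDias
-- ===== SOURCE B (Python) =====
-- def addDiasLaborales(dias, horaEntrada, horaSalida):
--     parts = []
--     for i, d in enumerate(dias):
--         if d is None:
--             continue
--         s = d
--         if i < len(horaEntrada) and horaEntrada[i] != "":
--             s = s + "(" + horaEntrada[i]
--         if i < len(horaSalida) and horaSalida[i] != "":
--             s = s + "-" + horaSalida[i] + ")"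
--         parts.append(s)
--     return ", ".join(parts)
-- ===== Notes on version B (the rewrite author's own statement) =====
-- stated objective: faster
-- what changed: Replaces the two O(n*m) nested i==j index loops plus a flag-driven concatenation loop by a single linear enumerate pass that formats each day directly and a ', '.join; B also does not mutate the dias list in place as A does.
import Mathlib
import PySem

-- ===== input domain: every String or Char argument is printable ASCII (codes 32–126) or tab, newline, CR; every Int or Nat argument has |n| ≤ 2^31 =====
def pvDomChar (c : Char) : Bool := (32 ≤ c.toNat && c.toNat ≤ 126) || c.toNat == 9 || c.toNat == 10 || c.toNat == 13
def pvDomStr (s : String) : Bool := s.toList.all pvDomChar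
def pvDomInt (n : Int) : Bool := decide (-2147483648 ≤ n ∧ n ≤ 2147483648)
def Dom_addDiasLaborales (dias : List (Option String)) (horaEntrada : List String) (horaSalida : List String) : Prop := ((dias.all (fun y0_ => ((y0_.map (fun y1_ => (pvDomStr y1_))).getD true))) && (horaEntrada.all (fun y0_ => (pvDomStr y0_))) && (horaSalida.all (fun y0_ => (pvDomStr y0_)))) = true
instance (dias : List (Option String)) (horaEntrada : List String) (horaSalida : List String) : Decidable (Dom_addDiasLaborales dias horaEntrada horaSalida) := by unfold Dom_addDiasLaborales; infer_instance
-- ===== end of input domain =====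

-- B replaces A's two O(n·m) nested `i == j` index loops and the flag-driven join loop by one
-- linear enumerate pass plus ", ".join (objective: faster, asymptotic). A mutates `dias` in place,
-- B does not; the equivalence proved here is about the RETURN value only.

-- ===== PORT A =====
-- body of the inner entry-time loop (executed when i == j), step for step
def pvBodyE (horaEntrada : List String) (ds : List (Option String)) (i j : Int) : List (Option String) :=
  match PySem.List.pyGetD ds i none with
  | some s =>
      if PySem.List.pyGetD horaEntrada j "" ≠ "" then
        PySem.List.pySetD ds i (some (s ++ "(" ++ PySem.List.pyGetD horaEntrada j ""))
      else ds
  | none => ds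

-- body of the inner exit-time loop (executed when i == j), step for step
def pvBodyS (horaSalida : List String) (ds : List (Option String)) (i j : Int) : List (Option String) :=
  match PySem.List.pyGetD ds i none with
  | some s =>
      if PySem.List.pyGetD horaSalida j "" ≠ "" then
        PySem.List.pySetD ds i (some (s ++ "-" ++ PySem.List.pyGetD horaSalida j "" ++ ")"))
      else ds
  | none => ds

def addDiasLaborales (dias : List (Option String)) (horaEntrada : List String) (horaSalida : List String) : String :=
  let ds1 := (PySem.List.pyRange 0 (PySem.List.len dias)).foldl (fun ds i =>
      (PySem.List.pyRange 0 (PySem.List.len horaEntrada)).foldl (fun ds j =>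
        if i = j then pvBodyE horaEntrada ds i j else ds) ds) dias
  let ds2 := (PySem.List.pyRange 0 (PySem.List.len ds1)).foldl (fun ds i =>
      (PySem.List.pyRange 0 (PySem.List.len horaSalida)).foldl (fun ds j =>
        if i = j then pvBodyS horaSalida ds i j else ds) ds) ds1
  let st := (PySem.List.pyRange 0 (PySem.List.len ds2)).foldl (fun (st : String × Int) i =>
      match PySem.List.pyGetD ds2 i none with
      | some s => if st.2 = 0 then (st.1 ++ s, 1) else (st.1 ++ ", " ++ s, st.2)
      | none => st) ("", 0)
  st.1

-- ===== PORT B =====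
def addDiasLaborales_alt (dias : List (Option String)) (horaEntrada : List String) (horaSalida : List String) : String :=
  let parts := (PySem.List.enumerate dias 0).foldl (fun (parts : List String) p =>
      match p.2 with
      | none => parts
      | some d =>
          let s := d
          let s := if p.1 < PySem.List.len horaEntrada ∧ PySem.List.pyGetD horaEntrada p.1 "" ≠ "" then
                     s ++ "(" ++ PySem.List.pyGetD horaEntrada p.1 "" else s
          let s := if p.1 < PySem.List.len horaSalida ∧ PySem.List.pyGetD horaSalida p.1 "" ≠ "" then
                     s ++ "-" ++ PySem.List.pyGetD horaSalida p.1 "" ++ ")" else s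
          parts ++ [s]) []
  PySem.Str.join ", " parts

-- ===== PRECONDITION & SPEC =====
def Spec_addDiasLaborales (dias : List (Option String)) (horaEntrada : List String) (horaSalida : List String) (out : String) : Prop := out = addDiasLaborales_alt dias horaEntrada horaSalida
instance (dias : List (Option String)) (horaEntrada : List String) (horaSalida : List String) (out : String) : Decidable (Spec_addDiasLaborales dias horaEntrada horaSalida out) := by unfold Spec_addDiasLaborales; infer_instance

-- ===== CLAIM (what is proved, stated in full; the proofs are below) =====
def Claim_equal_addDiasLaborales : Prop := ∀ (dias : List (Option String)) (horaEntrada : List String) (horaSalida : List String), Dom_addDiasLaborales dias horaEntrada horaSalida → Spec_addDiasLaborales dias horaEntrada horaSalida (addDiasLaborales dias horaEntrada horaSalida)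

-- ===== LEMMAS AND PROOFS =====

-- a loop `for j in range(n): if i == j: s = F s j` fires at most once, at j = i
theorem pvFoldlIteSingle {α : Type} (F : α → Int → α) (i : Int) (n : Nat) :
    ∀ s : α, (PySem.List.pyRange 0 (n : Int)).foldl (fun s j => if i = j then F s j else s) s
      = if 0 ≤ i ∧ i < (n : Int) then F s i else s := by
  induction n with
  | zero =>
      intro s
      rw [PySem.List.pyRange_one_eq_nil (by omega)]
      simp only [List.foldl_nil]
      rw [if_neg (by omega)]
  | succ n ih =>
      intro s
      have hcast : ((n + 1 : Nat) : Int) = (n : Int) + 1 := by push_cast; ring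
      rw [hcast, PySem.List.pyRange_one_succ_right (by omega), List.foldl_append, ih]
      by_cases hin : i = (n : Int)
      · subst hin
        have h1 : ¬(0 ≤ (n : Int) ∧ (n : Int) < (n : Int)) := by omega
        have h2 : 0 ≤ (n : Int) ∧ (n : Int) < (n : Int) + 1 := by omega
        rw [if_neg h1, List.foldl_cons, List.foldl_nil, if_pos rfl, if_pos h2]
      · simp only [List.foldl_cons, List.foldl_nil, if_neg hin]
        by_cases h : 0 ≤ i ∧ i < (n : Int)
        · rw [if_pos h, if_pos (by omega)]
        · rw [if_neg h, if_neg (by omega)]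

-- per-index image of one pass, starting at index k
def pvIdxMap (f : Nat → Option String → Option String) : Nat → List (Option String) → List (Option String)
  | _, [] => []
  | k, o :: t => f k o :: pvIdxMap f (k + 1) t

-- a fold over range(len ds) whose step rewrites exactly index i is pvIdxMap
theorem pvFoldlPoint (G : List (Option String) → Int → List (Option String))
    (f : Nat → Option String → Option String)
    (hG : ∀ (pre t : List (Option String)) (o : Option String),
      G (pre ++ o :: t) (pre.length : Int) = pre ++ f pre.length o :: t) :
    ∀ (t pre : List (Option String)),
      (PySem.List.pyRange (pre.length : Int) ((pre.length : Int) + (t.length : Int))).foldl G (pre ++ t)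
        = pre ++ pvIdxMap f pre.length t := by
  intro t
  induction t with
  | nil =>
      intro pre
      have h0 : ((pre.length : Int) + (([] : List (Option String)).length : Int)) = (pre.length : Int) := by
        simp
      rw [h0, PySem.List.pyRange_one_eq_nil le_rfl]
      simp [pvIdxMap]
  | cons o t ih =>
      intro pre
      rw [PySem.List.pyRange_one_cons (by simp), List.foldl_cons, hG pre t o]
      have hre : pre ++ f pre.length o :: t = (pre ++ [f pre.length o]) ++ t := by simp
      have hlen : ((pre ++ [f pre.length o]).length : Int) = (pre.length : Int) + 1 := by simp
      have hrange : PySem.List.pyRange ((pre.length : Int) + 1) ((pre.length : Int) + ((o :: t).length : Int))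
          = PySem.List.pyRange ((pre ++ [f pre.length o]).length : Int)
              (((pre ++ [f pre.length o]).length : Int) + (t.length : Int)) := by
        rw [hlen]; congr 1; simp; ring
      rw [hre, hrange, ih (pre ++ [f pre.length o])]
      simp [pvIdxMap]

-- the entry-time pass, per index
def pvF1 (horaEntrada : List String) (k : Nat) (o : Option String) : Option String :=
  o.map (fun s =>
    if (k : Int) < PySem.List.len horaEntrada ∧ PySem.List.pyGetD horaEntrada (k : Int) "" ≠ "" then
      s ++ "(" ++ PySem.List.pyGetD horaEntrada (k : Int) "" else s)

-- the exit-time pass, per index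
def pvF2 (horaSalida : List String) (k : Nat) (o : Option String) : Option String :=
  o.map (fun s =>
    if (k : Int) < PySem.List.len horaSalida ∧ PySem.List.pyGetD horaSalida (k : Int) "" ≠ "" then
      s ++ "-" ++ PySem.List.pyGetD horaSalida (k : Int) "" ++ ")" else s)

theorem pvGetD_mid (pre t : List (Option String)) (o : Option String) :
    PySem.List.pyGetD (pre ++ o :: t) (pre.length : Int) none = o := by
  rw [PySem.List.pyGetD_natCast]
  simp [List.getD]

theorem pvSetD_mid (pre t : List (Option String)) (o w : Option String) :
    PySem.List.pySetD (pre ++ o :: t) (pre.length : Int) w = pre ++ w :: t := by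
  rw [PySem.List.pySetD_natCast]
  simp

theorem pvPhaseE (horaEntrada : List String) (pre t : List (Option String)) (o : Option String) :
    (if 0 ≤ (pre.length : Int) ∧ (pre.length : Int) < (horaEntrada.length : Int) then
        pvBodyE horaEntrada (pre ++ o :: t) (pre.length : Int) (pre.length : Int)
      else pre ++ o :: t)
      = pre ++ pvF1 horaEntrada pre.length o :: t := by
  cases o with
  | none =>
      unfold pvBodyE pvF1
      rw [pvGetD_mid]
      simp
  | some s =>
      unfold pvBodyE pvF1
      rw [pvGetD_mid]
      simp only [PySem.List.len, Option.map_some]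
      by_cases hlt : (pre.length : Int) < (horaEntrada.length : Int)
      · rw [if_pos ⟨by omega, hlt⟩]
        by_cases hne : PySem.List.pyGetD horaEntrada (pre.length : Int) "" ≠ ""
        · rw [if_pos hne, if_pos ⟨hlt, hne⟩, pvSetD_mid]
        · rw [if_neg hne, if_neg (by tauto)]
      · rw [if_neg (by omega), if_neg (by tauto)]

theorem pvPhaseS (horaSalida : List String) (pre t : List (Option String)) (o : Option String) :
    (if 0 ≤ (pre.length : Int) ∧ (pre.length : Int) < (horaSalida.length : Int) then
        pvBodyS horaSalida (pre ++ o :: t) (pre.length : Int) (pre.length : Int)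
      else pre ++ o :: t)
      = pre ++ pvF2 horaSalida pre.length o :: t := by
  cases o with
  | none =>
      unfold pvBodyS pvF2
      rw [pvGetD_mid]
      simp
  | some s =>
      unfold pvBodyS pvF2
      rw [pvGetD_mid]
      simp only [PySem.List.len, Option.map_some]
      by_cases hlt : (pre.length : Int) < (horaSalida.length : Int)
      · rw [if_pos ⟨by omega, hlt⟩]
        by_cases hne : PySem.List.pyGetD horaSalida (pre.length : Int) "" ≠ ""
        · rw [if_pos hne, if_pos ⟨hlt, hne⟩, pvSetD_mid]
        · rw [if_neg hne, if_neg (by tauto)]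
      · rw [if_neg (by omega), if_neg (by tauto)]

-- A's first double loop computes the pvF1 pass
theorem pvLoop1 (dias : List (Option String)) (horaEntrada : List String) :
    (PySem.List.pyRange 0 (PySem.List.len dias)).foldl (fun ds i =>
        (PySem.List.pyRange 0 (PySem.List.len horaEntrada)).foldl (fun ds j =>
          if i = j then pvBodyE horaEntrada ds i j else ds) ds) dias
      = pvIdxMap (pvF1 horaEntrada) 0 dias := by
  have hbody : ∀ (ds : List (Option String)) (i : Int),
      (PySem.List.pyRange 0 (PySem.List.len horaEntrada)).foldl (fun ds j =>
        if i = j then pvBodyE horaEntrada ds i j else ds) ds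
      = if 0 ≤ i ∧ i < (horaEntrada.length : Int) then pvBodyE horaEntrada ds i i else ds := by
    intro ds i
    exact pvFoldlIteSingle (fun ds j => pvBodyE horaEntrada ds i j) i horaEntrada.length ds
  calc (PySem.List.pyRange 0 (PySem.List.len dias)).foldl (fun ds i =>
        (PySem.List.pyRange 0 (PySem.List.len horaEntrada)).foldl (fun ds j =>
          if i = j then pvBodyE horaEntrada ds i j else ds) ds) dias
      = (PySem.List.pyRange 0 (PySem.List.len dias)).foldl (fun ds i =>
          if 0 ≤ i ∧ i < (horaEntrada.length : Int) then pvBodyE horaEntrada ds i i else ds) dias := by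
        congr 1; funext ds i; exact hbody ds i
    _ = pvIdxMap (pvF1 horaEntrada) 0 dias := by
        have := pvFoldlPoint
          (fun ds i => if 0 ≤ i ∧ i < (horaEntrada.length : Int) then pvBodyE horaEntrada ds i i else ds)
          (pvF1 horaEntrada)
          (fun pre t o => pvPhaseE horaEntrada pre t o) dias []
        simpa [PySem.List.len] using this

-- A's second double loop computes the pvF2 pass
theorem pvLoop2 (ds1 : List (Option String)) (horaSalida : List String) :
    (PySem.List.pyRange 0 (PySem.List.len ds1)).foldl (fun ds i =>
        (PySem.List.pyRange 0 (PySem.List.len horaSalida)).foldl (fun ds j =>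
          if i = j then pvBodyS horaSalida ds i j else ds) ds) ds1
      = pvIdxMap (pvF2 horaSalida) 0 ds1 := by
  have hbody : ∀ (ds : List (Option String)) (i : Int),
      (PySem.List.pyRange 0 (PySem.List.len horaSalida)).foldl (fun ds j =>
        if i = j then pvBodyS horaSalida ds i j else ds) ds
      = if 0 ≤ i ∧ i < (horaSalida.length : Int) then pvBodyS horaSalida ds i i else ds := by
    intro ds i
    exact pvFoldlIteSingle (fun ds j => pvBodyS horaSalida ds i j) i horaSalida.length ds
  calc (PySem.List.pyRange 0 (PySem.List.len ds1)).foldl (fun ds i =>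
        (PySem.List.pyRange 0 (PySem.List.len horaSalida)).foldl (fun ds j =>
          if i = j then pvBodyS horaSalida ds i j else ds) ds) ds1
      = (PySem.List.pyRange 0 (PySem.List.len ds1)).foldl (fun ds i =>
          if 0 ≤ i ∧ i < (horaSalida.length : Int) then pvBodyS horaSalida ds i i else ds) ds1 := by
        congr 1; funext ds i; exact hbody ds i
    _ = pvIdxMap (pvF2 horaSalida) 0 ds1 := by
        have := pvFoldlPoint
          (fun ds i => if 0 ≤ i ∧ i < (horaSalida.length : Int) then pvBodyS horaSalida ds i i else ds)
          (pvF2 horaSalida)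
          (fun pre t o => pvPhaseS horaSalida pre t o) ds1 []
        simpa [PySem.List.len] using this

-- two passes compose pointwise
theorem pvIdxMapComp (f g : Nat → Option String → Option String) :
    ∀ (t : List (Option String)) (k : Nat),
      pvIdxMap g k (pvIdxMap f k t) = pvIdxMap (fun k o => g k (f k o)) k t := by
  intro t
  induction t with
  | nil => intro k; simp [pvIdxMap]
  | cons o t ih => intro k; simp [pvIdxMap, ih]

-- Str.join on a nonempty head peels one separator
theorem pvJoinSingleton (p : String) : PySem.Str.join ", " [p] = p := by
  apply String.toList_inj.mp
  simp [PySem.Str.join, PySem.Chars.join_singleton]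

theorem pvJoinConsCons (p q : String) (r : List String) :
    PySem.Str.join ", " (p :: q :: r) = p ++ ", " ++ PySem.Str.join ", " (q :: r) := by
  apply String.toList_inj.mp
  simp [PySem.Str.join, PySem.Chars.join_cons_cons]

-- A's third loop (flag k) joins the non-None entries with ", "
theorem pvFlagFoldOne (l : List (Option String)) : ∀ cad : String,
    (l.foldl (fun (st : String × Int) o =>
        match o with
        | some s => if st.2 = 0 then (st.1 ++ s, 1) else (st.1 ++ ", " ++ s, st.2)
        | none => st) (cad, 1)).1
      = PySem.Str.join ", " (cad :: l.filterMap id) := by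
  induction l with
  | nil => intro cad; simp [pvJoinSingleton]
  | cons o t ih =>
      intro cad
      cases o with
      | none => simpa using ih cad
      | some s =>
          simp only [List.foldl_cons, List.filterMap_cons]
          rw [show ((if (1 : Int) = 0 then (cad ++ s, (1:Int)) else (cad ++ ", " ++ s, (1:Int)))) = (cad ++ ", " ++ s, (1:Int)) by simp]
          rw [ih (cad ++ ", " ++ s)]
          rw [show (id (some s)) = some s from rfl]
          rw [pvJoinConsCons]
          cases h : t.filterMap id with
          | nil => rw [pvJoinSingleton, pvJoinSingleton]
          | cons x y => rw [pvJoinConsCons, pvJoinConsCons]; simp [String.append_assoc]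

theorem pvFlagFold (l : List (Option String)) :
    (l.foldl (fun (st : String × Int) o =>
        match o with
        | some s => if st.2 = 0 then (st.1 ++ s, 1) else (st.1 ++ ", " ++ s, st.2)
        | none => st) ("", 0)).1
      = PySem.Str.join ", " (l.filterMap id) := by
  induction l with
  | nil => simp [PySem.Str.join, PySem.Chars.join_nil]
  | cons o t ih =>
      cases o with
      | none => simpa using ih
      | some s =>
          simp only [List.foldl_cons, List.filterMap_cons, id_eq, reduceIte, String.empty_append]
          exact pvFlagFoldOne t s

-- B's enumerate loop collects exactly the composed pass, index by index
theorem pvBParts (horaEntrada horaSalida : List String) :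
    ∀ (t : List (Option String)) (k : Nat) (acc : List String),
      (PySem.List.enumerate t (k : Int)).foldl (fun (parts : List String) p =>
          match p.2 with
          | none => parts
          | some d =>
              let s := d
              let s := if p.1 < PySem.List.len horaEntrada ∧ PySem.List.pyGetD horaEntrada p.1 "" ≠ "" then
                         s ++ "(" ++ PySem.List.pyGetD horaEntrada p.1 "" else s
              let s := if p.1 < PySem.List.len horaSalida ∧ PySem.List.pyGetD horaSalida p.1 "" ≠ "" then
                         s ++ "-" ++ PySem.List.pyGetD horaSalida p.1 "" ++ ")" else s
              parts ++ [s]) acc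
        = acc ++ (pvIdxMap (fun k o => pvF2 horaSalida k (pvF1 horaEntrada k o)) k t).filterMap id := by
  intro t
  induction t with
  | nil => intro k acc; simp [PySem.List.enumerate_nil, pvIdxMap]
  | cons o t ih =>
      intro k acc
      rw [PySem.List.enumerate_cons, List.foldl_cons]
      have hk1 : ((k : Int) + 1) = ((k + 1 : Nat) : Int) := by push_cast; ring
      cases o with
      | none =>
          simp only [pvIdxMap, pvF1, pvF2, Option.map_none, List.filterMap_cons]
          rw [hk1, ih (k + 1) acc]
          rfl
      | some d =>
          have hF : pvF2 horaSalida k (pvF1 horaEntrada k (some d)) = some (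
              if (k : Int) < PySem.List.len horaSalida ∧ PySem.List.pyGetD horaSalida (k : Int) "" ≠ "" then
                (if (k : Int) < PySem.List.len horaEntrada ∧ PySem.List.pyGetD horaEntrada (k : Int) "" ≠ "" then
                    d ++ "(" ++ PySem.List.pyGetD horaEntrada (k : Int) "" else d) ++ "-" ++ PySem.List.pyGetD horaSalida (k : Int) "" ++ ")"
              else (if (k : Int) < PySem.List.len horaEntrada ∧ PySem.List.pyGetD horaEntrada (k : Int) "" ≠ "" then
                    d ++ "(" ++ PySem.List.pyGetD horaEntrada (k : Int) "" else d)) := rfl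
          rw [show pvIdxMap (fun k o => pvF2 horaSalida k (pvF1 horaEntrada k o)) k (some d :: t)
                = pvF2 horaSalida k (pvF1 horaEntrada k (some d))
                    :: pvIdxMap (fun k o => pvF2 horaSalida k (pvF1 horaEntrada k o)) (k + 1) t from rfl]
          rw [List.filterMap_cons, hF, hk1, ih (k + 1)]
          simp [List.append_assoc]

-- ===== VERDICT (by name: the statement is the Claim_ definition above) =====
theorem addDiasLaborales_spec : Claim_equal_addDiasLaborales := by
  intro dias horaEntrada horaSalida _
  unfold Spec_addDiasLaborales addDiasLaborales addDiasLaborales_alt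
  have hB := pvBParts horaEntrada horaSalida dias 0 []
  rw [Nat.cast_zero] at hB
  simp only [pvLoop1, pvLoop2, pvIdxMapComp, hB, List.nil_append]
  rw [PySem.List.foldl_pyRange_zero_pyGetD
        (pvIdxMap (fun k o => pvF2 horaSalida k (pvF1 horaEntrada k o)) 0 dias) none
        (fun (st : String × Int) o =>
          match o with
          | some s => if st.2 = 0 then (st.1 ++ s, 1) else (st.1 ++ ", " ++ s, st.2)
          | none => st) ("", 0),
      pvFlagFold]
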